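-- pv_equiv track=rewrite | github.com/BangSungjoon/Algorithm_Study | chw/week43/PGM/388352/sol.py | solution
-- ===== SOURCE A (Python) =====
-- from itertools import combinations
--
-- def solution(n, q, ans):
--     answer = 0
--
--     num_list = list(range(1, n + 1))
--     possible_code = list(combinations(num_list, 5))  # 가능한 5자리 조합
--
--     for code in possible_code:
--         for i in range(len(q)):
--             t = set(q[i]) & set(code)
--
--             if ans[i] != len(t):
--                 break
--         else:
--             answer += 1
--
--     return answer
-- ===== SOURCE B (Python) =====
-- def solution(n, q, ans):
--     # Backtracking over values 1..n threading per-query intersection counts,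
--     # pruning branches whose running counts already exceed a target.
--     cons = [(set(qi), a) for qi, a in zip(q, ans)]
--
--     def rec(vals, slots, counts):
--         if slots == 0:
--             return 1 if all(c == a for c, (_, a) in zip(counts, cons)) else 0
--         if len(vals) < slots:
--             return 0
--         v, rest = vals[0], vals[1:]
--         total = rec(rest, slots, counts)          # codes skipping v
--         new = [c + (v in s) for c, (s, _) in zip(counts, cons)]
--         if all(c <= a for c, (_, a) in zip(new, cons)):   # counts never decrease: prune
--             total += rec(rest, slots - 1, new)
--         return total
--
--     return rec(list(range(1, n + 1)), 5, [0] * len(cons))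
-- ===== Notes on version B (the rewrite author's own statement) =====
-- stated objective: alternative
-- what changed: A materialises all C(n,5) combinations and filters each by rebuilding set intersections per query; B runs a take/skip backtracking recursion over 1..n that threads per-query running intersection counts (precomputed query sets), pruning any branch whose running count already exceeds its target.
-- outside the precondition, e.g. on solution(5, [[1], [2]], [0]): A returns 0, B returns 0
import Mathlib
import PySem

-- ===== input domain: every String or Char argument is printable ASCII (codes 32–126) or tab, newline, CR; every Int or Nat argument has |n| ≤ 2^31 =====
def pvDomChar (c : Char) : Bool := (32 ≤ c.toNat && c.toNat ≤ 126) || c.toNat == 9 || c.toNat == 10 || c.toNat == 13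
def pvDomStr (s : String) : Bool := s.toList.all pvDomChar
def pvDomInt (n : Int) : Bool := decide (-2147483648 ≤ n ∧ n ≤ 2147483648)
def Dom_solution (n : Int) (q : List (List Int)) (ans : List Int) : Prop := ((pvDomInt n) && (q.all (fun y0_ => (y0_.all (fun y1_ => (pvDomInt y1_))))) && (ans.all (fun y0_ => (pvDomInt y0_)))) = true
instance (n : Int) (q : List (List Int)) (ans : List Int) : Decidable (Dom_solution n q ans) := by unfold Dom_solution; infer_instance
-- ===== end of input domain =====

-- B replaces A's "materialise all C(n,5) combinations, then intersect sets per query"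
-- with a take/skip backtracking search threading per-query running counts, pruned
-- when a running count exceeds its target (objective: alternative algorithm).

-- ===== PORT A =====
-- inner 'for i in range(len(q)): … break / else' loop; ans[i] via pyGet? (getD is
-- exact here: under Pre_ every accessed index is in range; out of range Python raises)
def solInner (q : List (List Int)) (ans : List Int) (code : List Int) : List Int → Bool
  | [] => true
  | i :: rest =>
    let t := PySem.Set.inter (PySem.Set.ofList ((PySem.List.pyGet? q i).getD []))
                             (PySem.Set.ofList code)
    if (PySem.List.pyGet? ans i).getD 0 ≠ (t.length : Int) then false
    else solInner q ans code rest

def solution (n : Int) (q : List (List Int)) (ans : List Int) : Int :=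
  let numList := PySem.List.pyRange 1 (n + 1) 1
  let possibleCode := PySem.List.combinations numList 5
  possibleCode.foldl
    (fun answer code =>
      if solInner q ans code (PySem.List.pyRange 0 (q.length : Int) 1) then answer + 1
      else answer)
    0

-- ===== PORT B =====
def altCons (q : List (List Int)) (ans : List Int) : List (PySem.Set Int × Int) :=
  (List.zip q ans).map (fun p => (PySem.Set.ofList p.1, p.2))

def altPass (cons : List (PySem.Set Int × Int)) (counts : List Int) : Bool :=
  (List.zip counts cons).all (fun p => p.1 == p.2.2)

def altOk (cons : List (PySem.Set Int × Int)) (counts : List Int) : Bool :=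
  (List.zip counts cons).all (fun p => decide (p.1 ≤ p.2.2))

def altBump (cons : List (PySem.Set Int × Int)) (counts : List Int) (v : Int) : List Int :=
  List.zipWith (fun c sa => c + (if PySem.Set.contains sa.1 v then 1 else 0)) counts cons

def altRec (cons : List (PySem.Set Int × Int)) :
    List Int → Nat → List Int → Int
  | vals, slots, counts =>
    if slots = 0 then (if altPass cons counts then 1 else 0)
    else if vals.length < slots then 0
    else
      match vals with
      | [] => 0
      | v :: rest =>
        let total := altRec cons rest slots counts
        let new := altBump cons counts v
        if altOk cons new then total + altRec cons rest (slots - 1) new else total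

def solution_alt (n : Int) (q : List (List Int)) (ans : List Int) : Int :=
  let cons := altCons q ans
  altRec cons (PySem.List.pyRange 1 (n + 1) 1) 5 (List.replicate cons.length 0)

-- ===== PRECONDITION & SPEC =====
-- Pre_ excludes inputs with n ≥ 5 and more queries than answers: there A raises
-- IndexError on ans[i] as soon as some code satisfies all the checkable constraints
-- (it returns 0 only when every code happens to fail early), so the exact raising
-- set is not closed-form; the stated condition conservatively excludes the whole
-- mismatched-length region.
def Pre_solution (n : Int) (q : List (List Int)) (ans : List Int) : Prop :=
  q.length ≤ ans.length ∨ n < 5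
instance (n : Int) (q : List (List Int)) (ans : List Int) : Decidable (Pre_solution n q ans) := by
  unfold Pre_solution; infer_instance

def pvWitness_solution : Int × List (List Int) × List Int := (6, [[1, 2], [3]], [1, 1])

def Spec_solution (n : Int) (q : List (List Int)) (ans : List Int) (out : Int) : Prop :=
  out = solution_alt n q ans
instance (n : Int) (q : List (List Int)) (ans : List Int) (out : Int) : Decidable (Spec_solution n q ans out) := by
  unfold Spec_solution; infer_instance

-- ===== CLAIM (what is proved, stated in full; the proofs are below) =====
def Claim_equal_solution : Prop := ∀ (n : Int) (q : List (List Int)) (ans : List Int), Dom_solution n q ans → Pre_solution n q ans → Spec_solution n q ans (solution n q ans)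

-- ===== LEMMAS AND PROOFS =====

-- accumulated counts after absorbing every element of a code
def addAll (cons : List (PySem.Set Int × Int)) (counts : List Int) (code : List Int) : List Int :=
  code.foldl (fun cts v => altBump cons cts v) counts

lemma addAll_nil_code (cons : List (PySem.Set Int × Int)) (counts : List Int) :
    addAll cons counts [] = counts := rfl

lemma addAll_cons_code (cons : List (PySem.Set Int × Int)) (counts : List Int) (v : Int)
    (code : List Int) :
    addAll cons counts (v :: code) = addAll cons (altBump cons counts v) code := rfl

lemma altOk_bump_false (cons : List (PySem.Set Int × Int)) (counts : List Int) (v : Int)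
    (h : altOk cons counts = false) : altOk cons (altBump cons counts v) = false := by
  induction cons generalizing counts with
  | nil => simp [altOk] at h
  | cons sa cs ih =>
    cases counts with
    | nil => simp [altOk] at h
    | cons c cts =>
      simp only [altOk, altBump, List.zipWith, List.zip_cons_cons, List.all_cons,
        Bool.and_eq_false_iff] at h ⊢
      rcases h with h | h
      · left
        simp only [decide_eq_false_iff_not, not_le] at h ⊢
        split_ifs <;> omega
      · right; exact ih cts h

lemma altOk_addAll_false (cons : List (PySem.Set Int × Int)) (counts : List Int)
    (code : List Int) (h : altOk cons counts = false) :
    altOk cons (addAll cons counts code) = false := by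
  induction code generalizing counts with
  | nil => exact h
  | cons v code ih => exact ih _ (altOk_bump_false cons counts v h)

lemma altOk_of_altPass (cons : List (PySem.Set Int × Int)) (counts : List Int)
    (h : altPass cons counts = true) : altOk cons counts = true := by
  induction cons generalizing counts with
  | nil => simp [altOk]
  | cons sa cs ih =>
    cases counts with
    | nil => simp [altOk]
    | cons c cts =>
      simp only [altPass, List.zip_cons_cons, List.all_cons, Bool.and_eq_true,
        beq_iff_eq] at h
      simp only [altOk, List.zip_cons_cons, List.all_cons, Bool.and_eq_true,
        decide_eq_true_eq]
      exact ⟨le_of_eq h.1, ih cts h.2⟩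

lemma altPass_addAll_false (cons : List (PySem.Set Int × Int)) (counts : List Int)
    (code : List Int) (h : altOk cons counts = false) :
    altPass cons (addAll cons counts code) = false := by
  by_contra hp
  have hp' : altPass cons (addAll cons counts code) = true := by
    cases hpa : altPass cons (addAll cons counts code) with
    | false => exact absurd hpa hp
    | true => rfl
  have := altOk_of_altPass _ _ hp'
  rw [altOk_addAll_false cons counts code h] at this
  exact Bool.false_ne_true this

-- B's recursion counts exactly the passing completions among all C(vals, slots) codes
lemma altRec_eq (cons : List (PySem.Set Int × Int)) (vals : List Int) (slots : Nat)
    (counts : List Int) :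
    altRec cons vals slots counts =
      ((PySem.List.combinations vals slots).countP
        (fun c => altPass cons (addAll cons counts c)) : Int) := by
  induction vals generalizing slots counts with
  | nil =>
    cases slots with
    | zero =>
      simp only [altRec, PySem.List.combinations_zero]
      simp [List.countP_cons, List.countP_nil, addAll_nil_code]
    | succ s => simp [altRec, PySem.List.combinations_nil_succ]
  | cons v rest ih =>
    cases slots with
    | zero =>
      simp only [altRec, PySem.List.combinations_zero]
      simp [List.countP_cons, List.countP_nil, addAll_nil_code]
    | succ s =>
      rw [altRec]
      simp only [Nat.succ_ne_zero, if_false, Nat.add_sub_cancel]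
      by_cases hlen : (v :: rest).length < s + 1
      · rw [if_pos hlen]
        have hr : rest.length < s := by simp at hlen; omega
        have h1 : PySem.List.combinations rest s = [] :=
          PySem.List.combinations_eq_nil_of_length_lt rest hr
        have h2 : PySem.List.combinations rest (s + 1) = [] :=
          PySem.List.combinations_eq_nil_of_length_lt rest (by omega)
        rw [PySem.List.combinations_cons_succ, h1, h2]
        simp
      · rw [if_neg hlen]
        rw [PySem.List.combinations_cons_succ, List.countP_append, List.countP_map]
        have hcomp : List.countP ((fun c => altPass cons (addAll cons counts c)) ∘
            (fun x => v :: x)) (PySem.List.combinations rest s) =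
            List.countP (fun c => altPass cons (addAll cons (altBump cons counts v) c))
              (PySem.List.combinations rest s) := by
          apply List.countP_congr
          intro c _
          simp [Function.comp, addAll_cons_code]
        rw [hcomp]
        by_cases hok : altOk cons (altBump cons counts v) = true
        · rw [if_pos hok, ih (s + 1) counts, ih s (altBump cons counts v)]
          push_cast
          ring
        · have hok' : altOk cons (altBump cons counts v) = false := by
            cases h : altOk cons (altBump cons counts v) with
            | false => rfl
            | true => exact absurd h hok
          rw [if_neg hok]
          have hzero : List.countP
              (fun c => altPass cons (addAll cons (altBump cons counts v) c))
              (PySem.List.combinations rest s) = 0 := by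
            rw [List.countP_eq_zero]
            intro c _
            simp [altPass_addAll_false cons (altBump cons counts v) c hok']
          rw [hzero, ih (s + 1) counts]
          push_cast
          ring

-- A's outer fold is a count
lemma foldl_count (p : List Int → Bool) (xs : List (List Int)) (k : Int) :
    xs.foldl (fun answer code => if p code then answer + 1 else answer) k =
      k + (xs.countP p : Int) := by
  induction xs generalizing k with
  | nil => simp [List.countP]
  | cons x xs ih =>
    simp only [List.foldl_cons, ih, List.countP_cons]
    by_cases h : p x = true <;> simp [h] <;> push_cast <;> ring

-- |set(qi) & set(code)| = number of code elements lying in qi (code without duplicates)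
lemma interLen_eq_countP (qi code : List Int) (hcode : code.Nodup) :
    ((PySem.Set.inter (PySem.Set.ofList qi) (PySem.Set.ofList code)).length : Int) =
      (code.countP (fun x => PySem.Set.contains (PySem.Set.ofList qi) x) : Int) := by
  have h1 : (PySem.Set.inter (PySem.Set.ofList qi) (PySem.Set.ofList code)).Nodup :=
    PySem.Set.nodup_inter _ _ (PySem.Set.nodup_ofList qi)
  have h2 : (code.filter (fun x => PySem.Set.contains (PySem.Set.ofList qi) x)).Nodup :=
    hcode.filter _
  have hperm : (PySem.Set.inter (PySem.Set.ofList qi) (PySem.Set.ofList code)).Perm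
      (code.filter (fun x => PySem.Set.contains (PySem.Set.ofList qi) x)) := by
    rw [List.perm_ext_iff_of_nodup h1 h2]
    intro a
    simp [PySem.Set.mem_inter, PySem.Set.mem_ofList, List.mem_filter, and_comm]
  rw [List.countP_eq_length_filter, hperm.length_eq]

-- A's inner loop from index k equals an all over the zipped suffix
lemma solInner_drop (q : List (List Int)) (ans : List Int) (code : List Int)
    (hq : q.length ≤ ans.length) (k : Nat) (hk : k ≤ q.length) :
    solInner q ans code (PySem.List.pyRange (k : Int) (q.length : Int) 1) =
      ((List.zip q ans).drop k).all
        (fun p => p.2 == ((PySem.Set.inter (PySem.Set.ofList p.1)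
                             (PySem.Set.ofList code)).length : Int)) := by
  have hzlen : (List.zip q ans).length = q.length := by
    rw [List.length_zip]; omega
  rcases Nat.lt_or_ge k q.length with hlt | hge
  · have hcons : PySem.List.pyRange (k : Int) (q.length : Int) 1 =
        (k : Int) :: PySem.List.pyRange ((k : Int) + 1) (q.length : Int) 1 :=
      PySem.List.pyRange_one_cons (by exact_mod_cast hlt)
    rw [hcons]
    have hqk : PySem.List.pyGet? q (k : Int) = some q[k] := by
      rw [PySem.List.pyGet?_natCast]; exact List.getElem?_eq_getElem hlt
    have hak : PySem.List.pyGet? ans (k : Int) = some (ans[k]'(by omega)) := by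
      rw [PySem.List.pyGet?_natCast]; exact List.getElem?_eq_getElem (by omega)
    have hdrop : (List.zip q ans).drop k =
        (List.zip q ans)[k]'(by omega) :: (List.zip q ans).drop (k + 1) :=
      (List.getElem_cons_drop (by omega)).symm
    have hget : (List.zip q ans)[k]'(by omega) = (q[k], ans[k]'(by omega)) := by
      simp
    have ih := solInner_drop q ans code hq (k + 1) (by omega)
    rw [solInner, hqk, hak, hdrop, hget]
    push_cast at ih ⊢
    rw [ih]
    simp only [List.all_cons]
    by_cases h : (ans[k]'(by omega) : Int) =
        ((PySem.Set.inter (PySem.Set.ofList q[k]) (PySem.Set.ofList code)).length : Int)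
    · simp [h]
    · simp [h]
  · have hke : k = q.length := le_antisymm hk hge
    subst hke
    rw [PySem.List.pyRange_one_eq_nil (by omega)]
    rw [List.drop_eq_nil_of_le (by omega)]
    simp [solInner]
termination_by q.length - k

-- componentwise unfolding of addAll
lemma addAll_cons (sa : PySem.Set Int × Int) (cs : List (PySem.Set Int × Int))
    (c : Int) (cts : List Int) (code : List Int) :
    addAll (sa :: cs) (c :: cts) code =
      (c + (code.countP (fun x => PySem.Set.contains sa.1 x) : Int)) ::
        addAll cs cts code := by
  induction code generalizing c cts with
  | nil => simp [addAll_nil_code]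
  | cons v code ih =>
    rw [addAll_cons_code]
    have hb : altBump (sa :: cs) (c :: cts) v =
        (c + (if PySem.Set.contains sa.1 v then 1 else 0)) :: altBump cs cts v := rfl
    rw [hb, ih, addAll_cons_code, List.countP_cons]
    congr 1
    by_cases h : PySem.Set.contains sa.1 v = true <;> simp [h] <;> push_cast <;> ring


-- bridge: A's per-code check equals B's pass-on-final-counts, over the zipped queries
lemma zip_bridge (l : List (List Int × Int)) (code : List Int) (hcode : code.Nodup) :
    (l.all (fun p => p.2 == ((PySem.Set.inter (PySem.Set.ofList p.1)
        (PySem.Set.ofList code)).length : Int))) =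
      altPass (l.map (fun p => (PySem.Set.ofList p.1, p.2)))
        (addAll (l.map (fun p => (PySem.Set.ofList p.1, p.2)))
          (List.replicate l.length 0) code) := by
  induction l with
  | nil => simp [altPass, addAll_nil_code]
  | cons p l ih =>
    simp only [List.map_cons, List.length_cons, List.replicate_succ]
    rw [addAll_cons]
    simp only [altPass, List.zip_cons_cons, List.all_cons]
    rw [← altPass]
    rw [← ih]
    congr 1
    have hi := interLen_eq_countP p.1 code hcode
    rw [zero_add, ← hi]
    by_cases h : p.2 = ((PySem.Set.inter (PySem.Set.ofList p.1)
        (PySem.Set.ofList code)).length : Int)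
    · simp [h]
    · simp [h, Ne.symm h]

-- ===== VERDICT (by name: the statement is the Claim_ definition above) =====
theorem solution_spec : Claim_equal_solution := by
  intro n q ans _hdom hpre
  unfold Spec_solution solution solution_alt
  simp only []
  rw [foldl_count, zero_add]
  rw [altRec_eq]
  rcases hpre with hq | hn
  · -- enough answers for every query: pointwise bridge on each code
    congr 1
    apply List.countP_congr
    intro code hmem
    have hnod : code.Nodup := by
      have hsub := PySem.List.sublist_of_mem_combinations hmem
      exact hsub.nodup (PySem.List.nodup_pyRange_one 1 (n + 1))
    have h0 := solInner_drop q ans code hq 0 (Nat.zero_le _)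
    simp only [Nat.cast_zero, List.drop_zero] at h0
    rw [h0]
    have hz := zip_bridge (List.zip q ans) code hnod
    rw [hz]
    simp [altCons]
  · -- n < 5: no 5-combinations exist, both sides count an empty list
    have hlen : (PySem.List.pyRange 1 (n + 1) 1).length < 5 := by
      rw [PySem.List.length_pyRange_one]
      omega
    rw [PySem.List.combinations_eq_nil_of_length_lt _ hlen]
    simp
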